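-- pv_equiv track=rewrite | github.com/Sbauermaner/StudioCore-API | studiocore/monolith_v4_3_1.py | _infer_texture_from_mood
-- ===== SOURCE A (Python) =====
-- from typing import Dict, Any, List, Tuple, Optional
--
-- def _infer_texture_from_mood(mood: str, emotions: Dict[str, float]) -> str:
--     """
--     Infer vocal texture based on mood and emotions.
--     """
--     mood_lower = (mood or "").lower()
--     emotion_keys = [k.lower() for k in emotions.keys()] if emotions else []
--
--     # Reflective/introspective moods -> breathy/intimate
--     if any(word in mood_lower for word in ["reflective", "introspective", "melancholic", "nostalgic", "peaceful"]):
--         return "breathy/intimate"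
--     if any(word in emotion_keys for word in ["peace", "nostalgia", "melancholy"]):
--         return "breathy/intimate"
--
--     # Uplifting/energetic moods -> resonant
--     if any(word in mood_lower for word in ["uplifting", "energetic", "joyful", "triumphant"]):
--         return "resonant"
--     if any(word in emotion_keys for word in ["joy", "triumph", "energy"]):
--         return "resonant"
--
--     # Default
--     return "dynamic"
-- ===== SOURCE B (Python) =====
-- # Priority-map re-implementation: every trigger keyword is mapped to its rule
-- # priority; the answer is the texture of the minimum priority over all matched
-- # signals (correct because within a rule the mood branch and the emotion branch
-- # return the same texture, so only the first-matching rule index matters).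
--
-- _MOOD_PRIO = {"reflective": 0, "introspective": 0, "melancholic": 0,
--               "nostalgic": 0, "peaceful": 0,
--               "uplifting": 1, "energetic": 1, "joyful": 1, "triumphant": 1}
-- _EMO_PRIO = {"peace": 0, "nostalgia": 0, "melancholy": 0,
--              "joy": 1, "triumph": 1, "energy": 1}
-- _TEXTURES = ("breathy/intimate", "resonant", "dynamic")
--
--
-- def _infer_texture_from_mood(mood, emotions):
--     mood_lower = (mood or "").lower()
--     best = 2
--     for word, prio in _MOOD_PRIO.items():
--         if prio < best and word in mood_lower:
--             best = prio
--     for key in (emotions or {}):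
--         prio = _EMO_PRIO.get(key.lower(), 2)
--         if prio < best:
--             best = prio
--     return _TEXTURES[best]
-- ===== Notes on version B (the rewrite author's own statement) =====
-- stated objective: alternative
-- what changed: Replaces the ordered four-branch if-chain by a priority computation: each keyword is mapped to its rule index in two dicts, one pass accumulates the minimum matched priority (emotion keys looked up in a hash map instead of scanning keyword lists), and the texture is selected by indexing a tuple with that minimum.
import Mathlib
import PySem

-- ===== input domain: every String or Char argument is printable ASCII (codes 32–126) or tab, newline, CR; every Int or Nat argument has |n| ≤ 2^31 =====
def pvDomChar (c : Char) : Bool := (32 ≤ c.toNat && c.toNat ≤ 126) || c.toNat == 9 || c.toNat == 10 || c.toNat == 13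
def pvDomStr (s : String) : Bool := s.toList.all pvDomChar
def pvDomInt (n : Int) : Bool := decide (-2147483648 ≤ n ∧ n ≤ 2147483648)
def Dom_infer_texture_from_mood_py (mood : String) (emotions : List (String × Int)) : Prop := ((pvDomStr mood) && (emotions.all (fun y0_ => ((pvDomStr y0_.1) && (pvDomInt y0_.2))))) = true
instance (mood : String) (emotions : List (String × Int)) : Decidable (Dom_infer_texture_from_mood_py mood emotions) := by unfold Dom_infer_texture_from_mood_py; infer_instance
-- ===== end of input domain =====

-- B replaces A's ordered if-chain by a priority computation: keywords map to rule
-- indices, one accumulation takes the minimum matched priority, and the texture is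
-- selected by indexing with that minimum (objective: alternative).

-- ===== PORT A =====
def infer_texture_from_mood_py (mood : String) (emotions : List (String × Int)) : String :=
  let mood_lower := PySem.Str.lower (if mood.isEmpty then "" else mood)
  let emotion_keys : List String :=
    if emotions.isEmpty then [] else emotions.map (fun k => PySem.Str.lower k.1)
  if (["reflective", "introspective", "melancholic", "nostalgic", "peaceful"]).any
      (fun w => PySem.Str.isIn w mood_lower) then "breathy/intimate"
  else if (["peace", "nostalgia", "melancholy"]).any (fun w => emotion_keys.contains w) then
    "breathy/intimate"
  else if (["uplifting", "energetic", "joyful", "triumphant"]).any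
      (fun w => PySem.Str.isIn w mood_lower) then "resonant"
  else if (["joy", "triumph", "energy"]).any (fun w => emotion_keys.contains w) then "resonant"
  else "dynamic"

-- ===== PORT B =====
def pvMoodPrio : List (String × Nat) :=
  [("reflective", 0), ("introspective", 0), ("melancholic", 0), ("nostalgic", 0),
   ("peaceful", 0), ("uplifting", 1), ("energetic", 1), ("joyful", 1), ("triumphant", 1)]

def pvEmoPrio : PySem.Dict String Nat :=
  PySem.Dict.ofList
    [("peace", 0), ("nostalgia", 0), ("melancholy", 0), ("joy", 1), ("triumph", 1), ("energy", 1)]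

def pvTextures : List String := ["breathy/intimate", "resonant", "dynamic"]

def infer_texture_from_mood_py_alt (mood : String) (emotions : List (String × Int)) : String :=
  let mood_lower := PySem.Str.lower (if mood.isEmpty then "" else mood)
  let best1 : Nat := pvMoodPrio.foldl
    (fun best wp => if wp.2 < best ∧ PySem.Str.isIn wp.1 mood_lower = true then wp.2 else best) 2
  let best2 : Nat := (if emotions.isEmpty then [] else emotions).foldl
    (fun best kv =>
      let prio := PySem.Dict.getD pvEmoPrio (PySem.Str.lower kv.1) 2
      if prio < best then prio else best) best1
  -- _TEXTURES[best]: best2 ≤ 2 always (both folds only shrink the start value 2),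
  -- so this list indexing never falls back to the default.
  pvTextures.getD best2 "dynamic"

-- ===== PRECONDITION & SPEC =====
def Spec_infer_texture_from_mood_py (mood : String) (emotions : List (String × Int)) (out : String) : Prop := out = infer_texture_from_mood_py_alt mood emotions
instance (mood : String) (emotions : List (String × Int)) (out : String) : Decidable (Spec_infer_texture_from_mood_py mood emotions out) := by unfold Spec_infer_texture_from_mood_py; infer_instance

-- ===== CLAIM (what is proved, stated in full; the proofs are below) =====
def Claim_equal_infer_texture_from_mood_py : Prop := ∀ (mood : String) (emotions : List (String × Int)), Dom_infer_texture_from_mood_py mood emotions → Spec_infer_texture_from_mood_py mood emotions (infer_texture_from_mood_py mood emotions)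

-- ===== LEMMAS AND PROOFS =====

-- the priority g assigned to an emotion key
def pvG (k : String) : Nat := PySem.Dict.getD pvEmoPrio (PySem.Str.lower k) 2

theorem pvEmoPrio_mk : pvEmoPrio = PySem.Dict.mk
    [("peace", 0), ("nostalgia", 0), ("melancholy", 0), ("joy", 1), ("triumph", 1), ("energy", 1)] := by
  decide

theorem pv_get?_nil (s : String) :
    (PySem.Dict.mk ([] : List (String × Nat))).get? s = none := rfl

theorem pvG_eq (k : String) : pvG k =
    (if "peace" = PySem.Str.lower k then 0 else if "nostalgia" = PySem.Str.lower k then 0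
     else if "melancholy" = PySem.Str.lower k then 0 else if "joy" = PySem.Str.lower k then 1
     else if "triumph" = PySem.Str.lower k then 1 else if "energy" = PySem.Str.lower k then 1
     else 2) := by
  unfold pvG
  rw [pvEmoPrio_mk]
  simp only [PySem.Dict.getD_eq_get?_getD, PySem.Dict.get?_mk_cons, pv_get?_nil, beq_iff_eq]
  split_ifs <;> rfl

theorem pvG_cases (k : String) : pvG k = 0 ∨ pvG k = 1 ∨ pvG k = 2 := by
  rw [pvG_eq]; split_ifs <;> simp

theorem pvG_eq_zero_iff (k : String) :
    pvG k = 0 ↔ (PySem.Str.lower k = "peace" ∨ PySem.Str.lower k = "nostalgia" ∨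
                 PySem.Str.lower k = "melancholy") := by
  rw [pvG_eq]; split_ifs with h1 h2 h3 h4 h5 h6
  · exact iff_of_true rfl (Or.inl h1.symm)
  · exact iff_of_true rfl (Or.inr (Or.inl h2.symm))
  · exact iff_of_true rfl (Or.inr (Or.inr h3.symm))
  all_goals exact ⟨fun h => absurd h (by decide),
    fun h => by rcases h with h | h | h <;> exact absurd h.symm (by assumption)⟩

theorem pvG_eq_one_iff (k : String) :
    pvG k = 1 ↔ (PySem.Str.lower k = "joy" ∨ PySem.Str.lower k = "triumph" ∨
                 PySem.Str.lower k = "energy") := by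
  rw [pvG_eq]; split_ifs with h1 h2 h3 h4 h5 h6
  · exact ⟨fun h => absurd h (by decide),
      fun h => by rcases h with h | h | h <;> exact absurd (h1.trans h) (by decide)⟩
  · exact ⟨fun h => absurd h (by decide),
      fun h => by rcases h with h | h | h <;> exact absurd (h2.trans h) (by decide)⟩
  · exact ⟨fun h => absurd h (by decide),
      fun h => by rcases h with h | h | h <;> exact absurd (h3.trans h) (by decide)⟩
  · exact iff_of_true rfl (Or.inl h4.symm)
  · exact iff_of_true rfl (Or.inr (Or.inl h5.symm))
  · exact iff_of_true rfl (Or.inr (Or.inr h6.symm))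
  · exact ⟨fun h => absurd h (by decide),
      fun h => by rcases h with h | h | h <;> exact absurd h.symm (by assumption)⟩

-- closed form of the min-accumulating emotion loop (start value ≤ 2)
theorem pvFold_emotions (l : List (String × Int)) :
    ∀ b : Nat, b ≤ 2 →
    l.foldl (fun best kv =>
        let prio := PySem.Dict.getD pvEmoPrio (PySem.Str.lower kv.1) 2
        if prio < best then prio else best) b
    = if l.any (fun kv => pvG kv.1 == 0) then 0
      else if l.any (fun kv => pvG kv.1 == 1) then min b 1 else b := by
  induction l with
  | nil => intro b _; simp
  | cons kv tl ih =>
    intro b hb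
    have h2 : pvEmoPrio.getD (PySem.Str.lower kv.1) 2 = pvG kv.1 := rfl
    simp only [List.foldl, List.any_cons]
    rcases pvG_cases kv.1 with h | h | h
    · have hstep : (if pvEmoPrio.getD (PySem.Str.lower kv.1) 2 < b then
          pvEmoPrio.getD (PySem.Str.lower kv.1) 2 else b) = 0 := by
        rw [h2, h]; split_ifs <;> omega
      rw [hstep, ih 0 (by omega)]; simp only [h]
      simp only [beq_self_eq_true, Bool.true_or]
      split_ifs <;> omega
    · have hstep : (if pvEmoPrio.getD (PySem.Str.lower kv.1) 2 < b then
          pvEmoPrio.getD (PySem.Str.lower kv.1) 2 else b) = min b 1 := by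
        rw [h2, h]; split_ifs <;> omega
      rw [hstep, ih (min b 1) (by omega)]; simp only [h]
      simp only [show ((1 : Nat) == 0) = false by rfl, show ((1 : Nat) == 1) = true by rfl,
        Bool.false_or, Bool.true_or]
      split_ifs <;> omega
    · have hstep : (if pvEmoPrio.getD (PySem.Str.lower kv.1) 2 < b then
          pvEmoPrio.getD (PySem.Str.lower kv.1) 2 else b) = b := by
        rw [h2, h]; split_ifs <;> omega
      rw [hstep, ih b hb]; simp only [h]
      simp only [show ((2 : Nat) == 0) = false by rfl, show ((2 : Nat) == 1) = false by rfl,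
        Bool.false_or]

-- closed form of the literal 9-step mood loop, as a pure boolean computation
theorem pvFold_mood_bool (a1 a2 a3 a4 a5 b1 b2 b3 b4 : Bool) :
    List.foldl (fun (best : Nat) (wp : Bool × Nat) =>
        if wp.2 < best ∧ wp.1 = true then wp.2 else best) 2
      [(a1, 0), (a2, 0), (a3, 0), (a4, 0), (a5, 0), (b1, 1), (b2, 1), (b3, 1), (b4, 1)]
    = if a1 || (a2 || (a3 || (a4 || (a5 || false)))) then 0
      else if b1 || (b2 || (b3 || (b4 || false))) then 1 else 2 := by
  cases a1 <;> cases a2 <;> cases a3 <;> cases a4 <;> cases a5 <;>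
    cases b1 <;> cases b2 <;> cases b3 <;> cases b4 <;> decide

set_option maxHeartbeats 1000000 in
theorem pvFold_mood (ml : String) :
    pvMoodPrio.foldl
      (fun best wp => if wp.2 < best ∧ PySem.Str.isIn wp.1 ml = true then wp.2 else best) 2
    = if (["reflective", "introspective", "melancholic", "nostalgic", "peaceful"]).any
          (fun w => PySem.Str.isIn w ml) then 0
      else if (["uplifting", "energetic", "joyful", "triumphant"]).any
          (fun w => PySem.Str.isIn w ml) then 1 else 2 :=
  pvFold_mood_bool (PySem.Str.isIn "reflective" ml) (PySem.Str.isIn "introspective" ml)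
    (PySem.Str.isIn "melancholic" ml) (PySem.Str.isIn "nostalgic" ml)
    (PySem.Str.isIn "peaceful" ml) (PySem.Str.isIn "uplifting" ml)
    (PySem.Str.isIn "energetic" ml) (PySem.Str.isIn "joyful" ml)
    (PySem.Str.isIn "triumphant" ml)

-- A's emotion membership test, rephrased as B's any-over-the-input test
theorem pvEmo_any_zero (emotions : List (String × Int)) :
    ((["peace", "nostalgia", "melancholy"]).any
        (fun w => (emotions.map (fun k => PySem.Str.lower k.1)).contains w))
    = emotions.any (fun kv => pvG kv.1 == 0) := by
  rw [Bool.eq_iff_iff]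
  simp only [List.any_eq_true, List.mem_map, List.contains_iff_mem, beq_iff_eq,
    pvG_eq_zero_iff, List.mem_cons, List.not_mem_nil, or_false]
  constructor
  · rintro ⟨w, hw, kv, hkv, hl⟩
    refine ⟨kv, hkv, ?_⟩
    rcases hw with rfl | rfl | rfl
    · exact Or.inl hl
    · exact Or.inr (Or.inl hl)
    · exact Or.inr (Or.inr hl)
  · rintro ⟨kv, hkv, h | h | h⟩
    · exact ⟨"peace", Or.inl rfl, kv, hkv, h⟩
    · exact ⟨"nostalgia", Or.inr (Or.inl rfl), kv, hkv, h⟩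
    · exact ⟨"melancholy", Or.inr (Or.inr rfl), kv, hkv, h⟩

theorem pvEmo_any_one (emotions : List (String × Int)) :
    ((["joy", "triumph", "energy"]).any
        (fun w => (emotions.map (fun k => PySem.Str.lower k.1)).contains w))
    = emotions.any (fun kv => pvG kv.1 == 1) := by
  rw [Bool.eq_iff_iff]
  simp only [List.any_eq_true, List.mem_map, List.contains_iff_mem, beq_iff_eq,
    pvG_eq_one_iff, List.mem_cons, List.not_mem_nil, or_false]
  constructor
  · rintro ⟨w, hw, kv, hkv, hl⟩
    refine ⟨kv, hkv, ?_⟩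
    rcases hw with rfl | rfl | rfl
    · exact Or.inl hl
    · exact Or.inr (Or.inl hl)
    · exact Or.inr (Or.inr hl)
  · rintro ⟨kv, hkv, h | h | h⟩
    · exact ⟨"joy", Or.inl rfl, kv, hkv, h⟩
    · exact ⟨"triumph", Or.inr (Or.inl rfl), kv, hkv, h⟩
    · exact ⟨"energy", Or.inr (Or.inr rfl), kv, hkv, h⟩

-- ===== VERDICT (by name: the statement is the Claim_ definition above) =====
theorem infer_texture_from_mood_py_spec : Claim_equal_infer_texture_from_mood_py := by
  intro mood emotions _
  unfold Spec_infer_texture_from_mood_py infer_texture_from_mood_py infer_texture_from_mood_py_alt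
  have hek : (if emotions.isEmpty then ([] : List String)
      else emotions.map (fun k => PySem.Str.lower k.1))
      = emotions.map (fun k => PySem.Str.lower k.1) := by
    cases emotions <;> simp
  have hem : (if emotions.isEmpty then ([] : List (String × Int)) else emotions) = emotions := by
    cases emotions <;> simp
  simp only [hek, hem]
  set ml := PySem.Str.lower (if mood.isEmpty then "" else mood) with hml
  rw [pvFold_mood ml]
  set c1 := (["reflective", "introspective", "melancholic", "nostalgic", "peaceful"]).any
      (fun w => PySem.Str.isIn w ml) with hc1
  set c2 := (["uplifting", "energetic", "joyful", "triumphant"]).any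
      (fun w => PySem.Str.isIn w ml) with hc2
  rw [pvEmo_any_zero, pvEmo_any_one]
  rw [pvFold_emotions emotions (if c1 = true then 0 else if c2 = true then 1 else 2)
        (by split_ifs <;> omega)]
  set e1 := emotions.any (fun kv => pvG kv.1 == 0) with he1
  set e2 := emotions.any (fun kv => pvG kv.1 == 1) with he2
  cases c1 <;> cases c2 <;> cases e1 <;> cases e2 <;> simp [pvTextures]
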